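-- pv_equiv track=rewrite | github.com/dande7lion/pythonClasses | set3/3.5.py | prepare_ruler
-- ===== SOURCE A (Python) =====
-- def prepare_ruler(size) -> (str, str):
--     if size == 0:
--         return "|", "0"
--     ruler_top = "|...."
--     ruler_bottom = "0"
--     for i in range(size-1):
--         ruler_bottom += "{:>5}".format(str(i+1))
--         if i < size-2:
--              ruler_top += "|...."
--     return ruler_top + "|", ruler_bottom
-- ===== SOURCE B (Python) =====
-- def _segments(n):
--     # n copies of "|...." by doubling
--     if n <= 0:
--         return ""
--     half = _segments(n // 2)
--     return half + half + ("|...." if n % 2 == 1 else "")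
--
-- def _labels(a, b):
--     # "{:>5}".format(a) + ... + "{:>5}".format(b), divide and conquer
--     if a > b:
--         return ""
--     if a == b:
--         return "{:>5}".format(a)
--     m = (a + b) // 2
--     return _labels(a, m) + _labels(m + 1, b)
--
-- def prepare_ruler(size) -> (str, str):
--     if size == 0:
--         return "|", "0"
--     n = max(1, size - 1)
--     return _segments(n) + "|", "0" + _labels(1, size - 1)
-- ===== Notes on version B (the rewrite author's own statement) =====
-- stated objective: alternative
-- what changed: A's single upward loop that accumulates both strings character-run by character-run (with an 'if i < size-2' guard) is replaced by divide and conquer: the top's max(1,size-1) segments are built by binary doubling and the bottom's labels 1..size-1 by a balanced midpoint split, each concatenation joining two halves.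
import Mathlib
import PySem

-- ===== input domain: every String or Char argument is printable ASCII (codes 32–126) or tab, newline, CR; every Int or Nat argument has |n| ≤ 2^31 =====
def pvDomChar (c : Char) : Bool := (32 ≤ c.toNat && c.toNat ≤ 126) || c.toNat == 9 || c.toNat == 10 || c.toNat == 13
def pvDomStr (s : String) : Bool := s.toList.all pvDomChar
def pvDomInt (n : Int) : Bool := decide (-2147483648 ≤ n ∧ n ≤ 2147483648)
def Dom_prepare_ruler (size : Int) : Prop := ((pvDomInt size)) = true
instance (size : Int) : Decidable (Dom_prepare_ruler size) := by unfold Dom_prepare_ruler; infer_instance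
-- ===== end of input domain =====

-- B replaces A's upward accumulator loop (with its 'if i < size-2' guard) by divide and
-- conquer: the top is max(1,size-1) segments built by doubling, the bottom a balanced-split
-- concatenation of the labels 1..size-1; objective: alternative.


-- "{:>5}".format(s): right-justify in width 5 with spaces (exact for our ASCII digit strings)
def fmt5 (s : String) : String := String.ofList (List.replicate (5 - s.toList.length) ' ') ++ s

-- ===== PORT A =====
def prepare_ruler (size : Int) : String × String :=
  if size = 0 then ("|", "0")
  else
    let st := (PySem.List.pyRange 0 (size - 1) 1).foldl
      (fun (st : String × String) i =>
        (if i < size - 2 then st.1 ++ "|...." else st.1,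
         st.2 ++ fmt5 (PySem.Int.toStr (i + 1))))
      ("|....", "0")
    (st.1 ++ "|", st.2)

-- ===== PORT B =====
-- n copies of "|...." by doubling (Source B's _segments)
def pvSegments (n : Int) : String :=
  if n ≤ 0 then ""
  else
    let half := pvSegments (PySem.Int.floordiv n 2)
    half ++ half ++ (if PySem.Int.mod n 2 = 1 then "|...." else "")
termination_by n.toNat
decreasing_by
  rw [PySem.Int.floordiv_eq_ediv_of_pos (by norm_num)]
  omega

-- fmt5(a) ++ ... ++ fmt5(b) by balanced splitting (Source B's _labels)
def pvLabels (a b : Int) : String :=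
  if b < a then ""
  else if a = b then fmt5 (PySem.Int.toStr a)
  else
    let m := PySem.Int.floordiv (a + b) 2
    pvLabels a m ++ pvLabels (m + 1) b
termination_by (b - a).toNat
decreasing_by
  all_goals (rw [PySem.Int.floordiv_eq_ediv_of_pos (by norm_num)]; omega)

def prepare_ruler_alt (size : Int) : String × String :=
  if size = 0 then ("|", "0")
  else
    let n : Int := max 1 (size - 1)
    (pvSegments n ++ "|", "0" ++ pvLabels 1 (size - 1))

-- ===== PRECONDITION & SPEC =====
def Spec_prepare_ruler (size : Int) (out : String × String) : Prop := out = prepare_ruler_alt size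
instance (size : Int) (out : String × String) : Decidable (Spec_prepare_ruler size out) := by unfold Spec_prepare_ruler; infer_instance

-- ===== CLAIM (what is proved, stated in full; the proofs are below) =====
def Claim_equal_prepare_ruler : Prop := ∀ (size : Int), Dom_prepare_ruler size → Spec_prepare_ruler size (prepare_ruler size)

-- ===== LEMMAS AND PROOFS =====

-- n copies of "|...."
def strMul (s : String) : Nat → String
  | 0 => ""
  | n + 1 => s ++ strMul s n

def joinStrs : List String → String
  | [] => ""
  | x :: xs => x ++ joinStrs xs

theorem joinStrs_append (l m : List String) : joinStrs (l ++ m) = joinStrs l ++ joinStrs m := by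
  induction l with
  | nil => simp [joinStrs]
  | cons x xs ih => simp [joinStrs, ih, String.append_assoc]

-- shared closed form of both programs
def rulerClosed (size : Int) : String × String :=
  if size = 0 then ("|", "0")
  else
    ("|...." ++ strMul "|...." (size - 2).toNat ++ "|",
     "0" ++ joinStrs ((PySem.List.pyRange 0 (size - 1) 1).map (fun i => fmt5 (PySem.Int.toStr (i + 1)))))

-- s commutes past its own repetitions
theorem strMul_comm (s : String) (n : Nat) : s ++ strMul s n = strMul s n ++ s := by
  induction n with
  | zero => simp [strMul]
  | succ k ih =>
    show s ++ (s ++ strMul s k) = (s ++ strMul s k) ++ s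
    rw [ih, ← String.append_assoc, ih]

-- A's loop state, characterised
theorem fold_char (l : List Int) (c : Int) (f : Int → String) (t b : String) :
    l.foldl (fun (st : String × String) i =>
        (if i < c then st.1 ++ "|...." else st.1, st.2 ++ f i)) (t, b)
      = (t ++ strMul "|...." (l.countP (fun i => decide (i < c))),
         b ++ joinStrs (l.map f)) := by
  induction l generalizing t b with
  | nil => simp [strMul, joinStrs]
  | cons x xs ih =>
    simp only [List.foldl_cons, List.countP_cons, List.map_cons, joinStrs, ih]
    by_cases hx : x < c <;>
      simp [hx, strMul, String.append_assoc, strMul_comm]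

theorem countP_pyRange (m : Int) (hm : 1 ≤ m) :
    (PySem.List.pyRange 0 m 1).countP (fun i => decide (i < m - 1)) = (m - 1).toNat := by
  have hsplit : PySem.List.pyRange 0 m 1
      = PySem.List.pyRange 0 (m - 1) 1 ++ [m - 1] := by
    have h := PySem.List.pyRange_one_succ_right (a := 0) (b := m - 1) (by omega)
    simpa [show m - 1 + 1 = m by ring] using h
  rw [hsplit, List.countP_append]
  have hall : (PySem.List.pyRange 0 (m - 1) 1).countP (fun i => decide (i < m - 1))
      = (PySem.List.pyRange 0 (m - 1) 1).length := by
    apply List.countP_eq_length.mpr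
    intro a ha
    have h2 := PySem.List.mem_pyRange_one.mp ha
    simp only [decide_eq_true_eq]
    omega
  rw [hall, PySem.List.length_pyRange_one]
  simp

-- A equals the closed form
theorem a_closed (size : Int) : prepare_ruler size = rulerClosed size := by
  unfold prepare_ruler rulerClosed
  by_cases h0 : size = 0
  · simp [h0]
  · simp only [h0, if_false]
    rw [fold_char]
    by_cases hle : size - 1 ≤ 0
    · rw [PySem.List.pyRange_one_eq_nil hle]
      have : (size - 2).toNat = 0 := by omega
      simp [this, strMul, joinStrs]
    · have hm : 1 ≤ size - 1 := by omega
      have he : size - 2 = size - 1 - 1 := by ring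
      rw [he, countP_pyRange (size - 1) hm]

-- strMul is additive in the count
theorem strMul_add (s : String) (m n : Nat) :
    strMul s (m + n) = strMul s m ++ strMul s n := by
  induction m with
  | zero => simp [strMul]
  | succ k ih =>
    rw [Nat.add_right_comm]
    show s ++ strMul s (k + n) = (s ++ strMul s k) ++ strMul s n
    rw [ih, String.append_assoc]

-- the doubling recursion produces exactly n.toNat copies
theorem segments_eq_aux (N : Nat) : ∀ n : Int, n.toNat ≤ N →
    pvSegments n = strMul "|...." n.toNat := by
  induction N with
  | zero =>
    intro n hn
    have h0 : n ≤ 0 := by omega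
    rw [pvSegments]
    simp [h0, show n.toNat = 0 by omega, strMul]
  | succ K ih =>
    intro n hn
    by_cases h0 : n ≤ 0
    · rw [pvSegments]; simp [h0, show n.toNat = 0 by omega, strMul]
    · rw [pvSegments]
      simp only [h0, if_false]
      have hfd : PySem.Int.floordiv n 2 = n / 2 :=
        PySem.Int.floordiv_eq_ediv_of_pos (by norm_num)
      have hmd : PySem.Int.mod n 2 = n % 2 :=
        PySem.Int.mod_eq_emod_of_pos (by norm_num)
      have hrec : pvSegments (PySem.Int.floordiv n 2)
          = strMul "|...." (PySem.Int.floordiv n 2).toNat := by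
        apply ih; rw [hfd]; omega
      rw [hrec]
      by_cases hodd : PySem.Int.mod n 2 = 1
      · have hcnt : n.toNat = (PySem.Int.floordiv n 2).toNat
            + ((PySem.Int.floordiv n 2).toNat + 1) := by
          rw [hmd] at hodd; rw [hfd]; omega
        simp only [hodd, if_true]
        rw [hcnt, strMul_add, strMul, strMul_comm]
        simp [String.append_assoc]
      · have hcnt : n.toNat = (PySem.Int.floordiv n 2).toNat
            + (PySem.Int.floordiv n 2).toNat := by
          rw [hfd]; rw [hmd] at hodd; omega
        simp only [hodd, if_false]
        rw [hcnt, strMul_add]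
        simp

-- the balanced split produces the labels in left-to-right order
theorem labels_eq_aux (N : Nat) : ∀ a b : Int, (b - a).toNat ≤ N →
    pvLabels a b
      = joinStrs ((PySem.List.pyRange a (b + 1) 1).map (fun i => fmt5 (PySem.Int.toStr i))) := by
  induction N with
  | zero =>
    intro a b h
    have hab : b ≤ a := by omega
    by_cases hlt : b < a
    · rw [pvLabels]
      simp [hlt, PySem.List.pyRange_one_eq_nil (by omega : b + 1 ≤ a), joinStrs]
    · have heq : a = b := by omega
      rw [pvLabels]
      simp [heq, PySem.List.pyRange_one_singleton, joinStrs]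
  | succ K ih =>
    intro a b h
    by_cases hlt : b < a
    · rw [pvLabels]
      simp [hlt, PySem.List.pyRange_one_eq_nil (by omega : b + 1 ≤ a), joinStrs]
    · by_cases heq : a = b
      · rw [pvLabels]
        simp [heq, PySem.List.pyRange_one_singleton, joinStrs]
      · have hab : a < b := by omega
        have hfd : PySem.Int.floordiv (a + b) 2 = (a + b) / 2 :=
          PySem.Int.floordiv_eq_ediv_of_pos (by norm_num)
        have hm1 : a ≤ PySem.Int.floordiv (a + b) 2 := by rw [hfd]; omega
        have hm2 : PySem.Int.floordiv (a + b) 2 < b := by rw [hfd]; omega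
        rw [pvLabels]
        simp only [hlt, if_false, heq, if_false]
        rw [ih a (PySem.Int.floordiv (a + b) 2) (by rw [hfd]; omega),
            ih (PySem.Int.floordiv (a + b) 2 + 1) b (by rw [hfd]; omega),
            PySem.List.pyRange_one_append a (PySem.Int.floordiv (a + b) 2 + 1) (b + 1)
              (by omega) (by omega),
            List.map_append, joinStrs_append]

-- B equals the closed form
theorem b_closed (size : Int) : prepare_ruler_alt size = rulerClosed size := by
  unfold prepare_ruler_alt rulerClosed
  by_cases h0 : size = 0
  · simp [h0]
  · simp only [h0, if_false]
    refine Prod.ext ?_ ?_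
    · show pvSegments (max 1 (size - 1)) ++ "|" = _
      rw [segments_eq_aux (max 1 (size - 1)).toNat _ le_rfl,
          show (max 1 (size - 1)).toNat = (size - 2).toNat + 1 by omega, strMul]
    · show "0" ++ pvLabels 1 (size - 1) = _
      rw [labels_eq_aux (size - 1 - 1).toNat 1 (size - 1) le_rfl,
          show size - 1 + 1 = size by ring]
      have hmap : (PySem.List.pyRange 1 size 1).map (fun i => fmt5 (PySem.Int.toStr i))
          = (PySem.List.pyRange 0 (size - 1) 1).map (fun i => fmt5 (PySem.Int.toStr (i + 1))) := by
        simp only [PySem.List.pyRange_one, List.map_map]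
        have hlen : (size - 1).toNat = (size - 1 - 0).toNat := by omega
        rw [show size - 1 - 0 = size - 1 by ring]
        apply List.map_congr_left
        intro k _
        simp [Function.comp, add_comm]
      rw [hmap]

-- ===== VERDICT (by name: the statement is the Claim_ definition above) =====
theorem prepare_ruler_spec : Claim_equal_prepare_ruler := by
  intro size _
  unfold Spec_prepare_ruler
  rw [a_closed, b_closed]
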